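-- pv_equiv track=rewrite | github.com/pypi-data/pypi-mirror-318 | packages/dgNova/dgNova-1.0.0-py3-none-any.whl/dgNova/designs/layouts.py | generate_simple_lattice
-- ===== SOURCE A (Python) =====
-- from typing import List, Tuple, Optional
--
-- def generate_simple_lattice(k: int) -> List[List[List[int]]]:
--     """
--     Generate layout for simple lattice design (k×k, 2 reps)
--
--     Parameters
--     ----------
--     k : int
--         Block size (sqrt of number of treatments)
--
--     Returns
--     -------
--     List[List[List[int]]]
--         Layout for each replication
--     """
--     treatments = k * k
--
--     # First replication - treatments in sequential order
--     rep1 = []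
--     for i in range(0, treatments, k):
--         rep1.append(list(range(i, i + k)))
--
--     # Second replication - cyclic development
--     rep2 = []
--     for i in range(k):
--         block = []
--         for j in range(k):
--             treatment = (i + j * k) % treatments
--             block.append(treatment)
--         rep2.append(block)
--
--     return [rep1, rep2]
-- ===== SOURCE B (Python) =====
-- from typing import List
--
--
-- def generate_simple_lattice(k: int) -> List[List[List[int]]]:
--     """Simple lattice layout (k x k, 2 reps) by slicing one flat sequence:
--     build flat = range(k*k) once, then carve rep1 rows as the contiguous
--     k-slices of flat and rep2 rows as the stride-k slices flat[j::k]
--     (treatment t sits in rep2 row t % k), with no per-cell arithmetic."""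
--     if k <= 0:
--         return [[], []]
--     flat = list(range(k * k))
--     rep1 = [flat[i * k:(i + 1) * k] for i in range(k)]
--     rep2 = [flat[j::k] for j in range(k)]
--     return [rep1, rep2]
-- ===== Notes on version B (the rewrite author's own statement) =====
-- stated objective: simpler
-- what changed: B builds one flat list range(k*k) and carves both replications out of it by slicing -- rep1 rows as contiguous k-slices, rep2 rows as stride-k slices flat[j::k] -- eliminating A's two hand-rolled loop nests and the per-cell modular formula (i + j*k) % k^2.
-- outside the precondition, e.g. on generate_simple_lattice(0): A raises ValueError, B returns [[], []]
import Mathlib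
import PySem

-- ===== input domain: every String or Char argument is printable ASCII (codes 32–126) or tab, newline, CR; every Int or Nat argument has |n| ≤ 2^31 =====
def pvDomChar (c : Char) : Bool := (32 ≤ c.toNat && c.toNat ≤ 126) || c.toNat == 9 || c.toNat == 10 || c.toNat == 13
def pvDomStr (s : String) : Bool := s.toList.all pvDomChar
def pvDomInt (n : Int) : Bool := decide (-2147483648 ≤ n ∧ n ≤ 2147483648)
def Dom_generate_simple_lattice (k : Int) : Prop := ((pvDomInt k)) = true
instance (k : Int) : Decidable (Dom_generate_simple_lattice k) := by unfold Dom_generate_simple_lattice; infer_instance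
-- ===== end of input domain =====

-- B slices both replications out of one flat list range(k*k) (rep1 rows = contiguous
-- k-slices, rep2 rows = stride-k slices flat[j::k]) instead of A's two loop nests with
-- the per-cell modular formula; objective: simpler.


-- ===== PORT A =====
-- `treatment % treatments`: the divisor `treatments = k*k` is 0 only when k = 0, where the
-- surrounding loops are empty and Python never evaluates the `%`; `PySem.Int.mod` is total,
-- so the port is exact on every input with k ≠ 0 (k = 0 itself raises in Python: Pre_ below).
def generate_simple_lattice (k : Int) : List (List (List Int)) :=
  let treatments := k * k
  let rep1 := (PySem.List.pyRange 0 treatments k).map (fun i => PySem.List.pyRange i (i + k) 1)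
  let rep2 := (PySem.List.pyRange 0 k 1).map (fun i =>
    (PySem.List.pyRange 0 k 1).map (fun j => PySem.Int.mod (i + j * k) treatments))
  [rep1, rep2]

-- ===== PORT B =====
-- `flat[j::k]`: slice? is none only for step 0; the body runs only for j ∈ range(k),
-- which is nonempty only when k ≠ 0, so the `.getD []` totalization is never used.
def generate_simple_lattice_alt (k : Int) : List (List (List Int)) :=
  if k ≤ 0 then [[], []] else
  let flat := PySem.List.pyRange 0 (k * k) 1
  let rep1 := (PySem.List.pyRange 0 k 1).map (fun i =>
    PySem.List.slice flat (some (i * k)) (some ((i + 1) * k)))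
  let rep2 := (PySem.List.pyRange 0 k 1).map (fun j =>
    (PySem.List.slice? flat (some j) none k).getD [])
  [rep1, rep2]

-- ===== PRECONDITION & SPEC =====
-- Pre_ excludes exactly k = 0, where A's `range(0, 0, 0)` raises ValueError (step 0).
def Pre_generate_simple_lattice (k : Int) : Prop := k ≠ 0
instance (k : Int) : Decidable (Pre_generate_simple_lattice k) := by unfold Pre_generate_simple_lattice; infer_instance
def pvWitness_generate_simple_lattice : Int := 3

def Spec_generate_simple_lattice (k : Int) (out : List (List (List Int))) : Prop := out = generate_simple_lattice_alt k
instance (k : Int) (out : List (List (List Int))) : Decidable (Spec_generate_simple_lattice k out) := by unfold Spec_generate_simple_lattice; infer_instance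

-- ===== CLAIM (what is proved, stated in full; the proofs are below) =====
def Claim_equal_generate_simple_lattice : Prop := ∀ (k : Int), Dom_generate_simple_lattice k → Pre_generate_simple_lattice k → Spec_generate_simple_lattice k (generate_simple_lattice k)

-- ===== LEMMAS AND PROOFS =====

theorem gsl_neg (k : Int) (hk : k < 0) :
    generate_simple_lattice k = generate_simple_lattice_alt k := by
  have hsq : ¬ (k * k < 0) := by nlinarith
  have h1 : PySem.List.pyRange 0 (k * k) k = [] := by
    simp only [PySem.List.pyRange, if_neg hk.ne, if_neg (by omega : ¬ (0:Int) < k), if_neg hsq]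
    simp
  have h2 : PySem.List.pyRange 0 k 1 = [] := by
    rw [PySem.List.pyRange_one]
    simp
    omega
  simp [generate_simple_lattice, generate_simple_lattice_alt, h1, h2, hk.le]

-- `flat[j::k]` on flat = range(k*k), 0 ≤ j < k: the stride-k slice is [j, j+k, …, j+(k-1)k].
theorem gsl_stride (k j : Int) (hk : 0 < k) (hj0 : 0 ≤ j) (hjk : j < k) :
    (PySem.List.slice? (PySem.List.pyRange 0 (k * k) 1) (some j) none k).getD []
      = (PySem.List.pyRange 0 k 1).map (fun m => j + k * m) := by
  have hlen : (PySem.List.pyRange 0 (k * k) 1).length = (k * k).toNat := by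
    rw [PySem.List.length_pyRange_one]; simp
  have hkk : (0:Int) ≤ k * k := by positivity
  unfold PySem.List.slice? PySem.List.sliceIndices
  rw [if_neg hk.ne']
  simp only [hlen, if_neg (by omega : ¬ k < 0), Int.toNat_of_nonneg hkk,
    if_neg (by omega : ¬ j < 0), min_eq_left (by nlinarith : j ≤ k * k), if_pos hk,
    if_pos (by nlinarith : j < k * k)]
  have hcount : ((k * k - j + k - 1) / k).toNat = k.toNat := by
    have h : k * k - j + k - 1 = (k - 1 - j) + k * k := by ring
    rw [h, Int.add_mul_ediv_left _ _ hk.ne',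
        Int.ediv_eq_zero_of_lt (by omega) (by omega)]
    simp
  rw [hcount, Option.getD_some, PySem.List.pyRange_one 0 k]
  simp only [sub_zero, List.map_map]
  refine List.filterMap_eq_map_iff_forall_eq_some.mpr (fun m hm => ?_)
  rw [List.mem_range] at hm
  simp only [Function.comp_apply, zero_add]
  have hjm0 : (0:Int) ≤ j + k * m := by positivity
  have hjm : j + k * (m : Int) < k * k := by
    have hm' : (m : Int) ≤ k - 1 := by omega
    nlinarith
  rw [List.getElem?_eq_getElem (by rw [hlen]; omega)]
  rw [PySem.List.getElem_pyRange_one]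
  congr 1
  rw [Int.toNat_of_nonneg hjm0]
  ring

theorem gsl_pos (k : Int) (hk : 0 < k) :
    generate_simple_lattice k = generate_simple_lattice_alt k := by
  have hcount : ((k * k - 0 + k - 1) / k).toNat = k.toNat := by
    have h : k * k - 0 + k - 1 = (k - 1) + k * k := by ring
    rw [h, Int.add_mul_ediv_left _ _ hk.ne',
        Int.ediv_eq_zero_of_lt (by omega) (by omega)]
    simp
  have hA1 : PySem.List.pyRange 0 (k * k) k
      = (List.range k.toNat).map (fun (t : ℕ) => (k * (t : Int))) := by
    rw [PySem.List.pyRange_of_pos _ _ hk, if_pos (by nlinarith : (0:Int) < k * k), hcount]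
    simp only [zero_add]
  have hlen : (PySem.List.pyRange 0 (k * k) 1).length = (k * k).toNat := by
    rw [PySem.List.length_pyRange_one]; simp
  -- rep1: each contiguous slice of flat is the corresponding pyRange row
  have hrep1 : ∀ t : ℕ, t < k.toNat →
      PySem.List.slice (PySem.List.pyRange 0 (k * k) 1) (some ((k * (t:Int)))) (some ((k * (t:Int)) + k))
        = PySem.List.pyRange (k * (t:Int)) (k * (t:Int) + k) 1 := by
    intro t ht
    have h0 : (0:Int) ≤ k * t := by positivity
    have h1 : (0:Int) ≤ k * t + k := by positivity
    rw [PySem.List.slice_toNat _ h0 h1]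
    refine List.ext_getElem ?_ ?_
    · simp [PySem.List.length_pyRange_one, hlen]
      have ht' : (t : Int) ≤ k - 1 := by omega
      have : k * (t:Int) + k ≤ k * k := by nlinarith
      omega
    · intro p hp1 hp2
      have h2 : (k * (t:Int)).toNat + p < (k * k).toNat := by
        simp only [List.length_take, List.length_drop, hlen] at hp1
        omega
      rw [List.getElem_take, List.getElem_drop, PySem.List.getElem_pyRange_one,
          PySem.List.getElem_pyRange_one]
      push_cast
      omega
  have hmod : ∀ i j : Int, 0 ≤ i → i < k → 0 ≤ j → j < k →
      PySem.Int.mod (i + j * k) (k * k) = i + j * k := by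
    intro i j hi0 hi hj0 hj
    rw [PySem.Int.mod_eq_emod_of_pos (by nlinarith)]
    exact Int.emod_eq_of_lt (by positivity) (by nlinarith)
  simp only [generate_simple_lattice, generate_simple_lattice_alt, hA1,
    if_neg (by omega : ¬ k ≤ 0)]
  refine congrArg₂ (fun a b => [a, b]) ?_ ?_
  · rw [PySem.List.pyRange_one 0 k]
    simp only [sub_zero, List.map_map]
    refine List.map_congr_left (fun t ht => ?_)
    rw [List.mem_range] at ht
    simp only [Function.comp_apply, zero_add]
    rw [show ((t:Int)) * k = k * (t:Int) by ring,
        show ((t:Int) + 1) * k = k * (t:Int) + k by ring]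
    exact (hrep1 t ht).symm
  · refine List.map_congr_left (fun i hi => ?_)
    rw [PySem.List.mem_pyRange_one] at hi
    rw [gsl_stride k i hk hi.1 hi.2]
    refine List.map_congr_left (fun j hj => ?_)
    rw [PySem.List.mem_pyRange_one] at hj
    rw [hmod i j hi.1 hi.2 hj.1 hj.2]
    ring

-- ===== VERDICT (by name: the statement is the Claim_ definition above) =====
theorem generate_simple_lattice_spec : Claim_equal_generate_simple_lattice := by
  intro k _ hpre
  unfold Spec_generate_simple_lattice
  rcases lt_or_gt_of_ne hpre with h | h
  · exact gsl_neg k h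
  · exact gsl_pos k h
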